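-- pv_equiv track=rewrite | github.com/cda2/BJ | python/src/bj1759.py | solution
-- ===== SOURCE A (Python) =====
-- from itertools import combinations
--
-- def solution(l, c, arr):
--     combs = [list(i) for i in list(combinations(sorted(arr), l))]
--     result = []
--     # 각 조합마다
--     for comb in combs:
--         # 자음 모음 개수 확인하는 변수
--         cons, vowel = 0, 0
--         # 각 글자마다
--         for char in comb:
--             # 자음인 경우 자음 변수 값 1 증가
--             if char not in {"a", "e", "i", "o", "u"}:
--                 cons += 1
--             # 모음인 경우 모음 변수 값 1 증가
--             else:
--                 vowel += 1
--         # 자음 >= 2, 모음 >= 1 인 경우만 결과 목록에 추가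
--         if cons >= 2 and vowel >= 1:
--             result.append("".join(comb))
--     # newline 문자열에 join 하여 반환
--     return "\n".join(result)
-- ===== SOURCE B (Python) =====
-- def solution(l, c, arr):
--     VOWELS = ("a", "e", "i", "o", "u")
--     out = []
--
--     def rec(rest, k, cons, vowel, acc):
--         # a full selection of k letters was made
--         if k == 0:
--             if cons >= 2 and vowel >= 1:
--                 out.append("".join(acc))
--             return
--         # not enough letters left to complete the selection
--         if len(rest) < k:
--             return
--         if not rest:
--             return
--         x, xs = rest[0], rest[1:]
--         # take x ...
--         if x in VOWELS:
--             rec(xs, k - 1, cons, vowel + 1, acc + [x])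
--         else:
--             rec(xs, k - 1, cons + 1, vowel, acc + [x])
--         # ... then skip x
--         rec(xs, k, cons, vowel, acc)
--
--     rec(sorted(arr), l, 0, 0, [])
--     return "\n".join(out)
-- ===== Notes on version B (the rewrite author's own statement) =====
-- stated objective: alternative
-- what changed: Replaces generate-all-combinations-then-count-and-filter with a single take/skip recursion over the sorted list that threads the consonant/vowel counts, prunes branches that cannot complete, and emits each valid string at the leaf.
import Mathlib
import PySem

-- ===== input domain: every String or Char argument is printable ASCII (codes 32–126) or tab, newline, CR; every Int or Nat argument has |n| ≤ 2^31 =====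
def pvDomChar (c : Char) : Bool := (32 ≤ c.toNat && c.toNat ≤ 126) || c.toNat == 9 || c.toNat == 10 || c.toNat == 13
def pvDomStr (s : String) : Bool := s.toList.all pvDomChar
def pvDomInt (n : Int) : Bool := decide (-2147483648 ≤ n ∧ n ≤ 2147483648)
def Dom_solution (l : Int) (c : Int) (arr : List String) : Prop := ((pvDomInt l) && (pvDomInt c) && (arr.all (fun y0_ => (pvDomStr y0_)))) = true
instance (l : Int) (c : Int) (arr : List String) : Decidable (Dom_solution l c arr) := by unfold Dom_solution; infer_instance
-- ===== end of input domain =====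

-- B replaces A's generate-all-then-count-and-filter with a take/skip recursion that
-- threads the consonant and vowel counts and emits each valid string at the leaf
-- ('alternative' objective; same asymptotic cost).

-- the vowel set literal both Pythons carry
def pvVowels : List String := ["a", "e", "i", "o", "u"]

-- ===== PORT A =====
def solution (l : Int) (c : Int) (arr : List String) : String :=
  let combs := PySem.List.combinations (PySem.List.sorted arr (fun x => x) false) l.toNat
  let result := combs.foldl (fun res comb =>
    let cv := comb.foldl
      (fun (cv : Int × Int) ch =>
        if ch ∉ pvVowels then (cv.1 + 1, cv.2) else (cv.1, cv.2 + 1)) (0, 0)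
    if 2 ≤ cv.1 ∧ 1 ≤ cv.2 then res ++ [PySem.Str.join "" comb] else res) []
  PySem.Str.join "\n" result

-- ===== PORT B =====
def solutionRec (rest : List String) (k : Int) (cons : Int) (vowel : Int) (acc : List String) : List String :=
  if k = 0 then
    (if 2 ≤ cons ∧ 1 ≤ vowel then [PySem.Str.join "" acc] else [])
  else if (rest.length : Int) < k then []
  else
    match rest with
    | [] => []
    | x :: xs =>
      (if x ∈ pvVowels then solutionRec xs (k - 1) cons (vowel + 1) (acc ++ [x])
       else solutionRec xs (k - 1) (cons + 1) vowel (acc ++ [x]))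
      ++ solutionRec xs k cons vowel acc
termination_by structural rest

def solution_alt (l : Int) (c : Int) (arr : List String) : String :=
  PySem.Str.join "\n" (solutionRec (PySem.List.sorted arr (fun x => x) false) l 0 0 [])

-- ===== PRECONDITION & SPEC =====
-- Pre_ excludes only l < 0, where Python A raises ValueError (combinations with negative r).
def Pre_solution (l : Int) (c : Int) (arr : List String) : Prop := 0 ≤ l
instance (l : Int) (c : Int) (arr : List String) : Decidable (Pre_solution l c arr) := by unfold Pre_solution; infer_instance
def pvWitness_solution : Int × Int × List String := (2, 0, ["a", "b", "c"])

def Spec_solution (l : Int) (c : Int) (arr : List String) (out : String) : Prop := out = solution_alt l c arr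
instance (l : Int) (c : Int) (arr : List String) (out : String) : Decidable (Spec_solution l c arr out) := by unfold Spec_solution; infer_instance

-- ===== CLAIM =====
def Claim_equal_solution : Prop := ∀ (l : Int) (c : Int) (arr : List String), Dom_solution l c arr → Pre_solution l c arr → Spec_solution l c arr (solution l c arr)

-- ===== LEMMAS AND PROOFS =====

-- A's per-combination consonant/vowel count, from (0,0)
def pvCnt (comb : List String) : Int × Int :=
  comb.foldl
    (fun (cv : Int × Int) ch =>
      if ch ∉ pvVowels then (cv.1 + 1, cv.2) else (cv.1, cv.2 + 1)) (0, 0)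

lemma pvCnt_shift (comb : List String) : ∀ (a b : Int),
    comb.foldl
      (fun (cv : Int × Int) ch =>
        if ch ∉ pvVowels then (cv.1 + 1, cv.2) else (cv.1, cv.2 + 1)) (a, b)
      = (a + (pvCnt comb).1, b + (pvCnt comb).2) := by
  induction comb with
  | nil => intro a b; simp [pvCnt]
  | cons y t ih =>
    intro a b
    by_cases hy : y ∈ pvVowels
    · have hc : pvCnt (y :: t) = ((pvCnt t).1, 1 + (pvCnt t).2) := by
        have h0 : pvCnt (y :: t)
            = t.foldl (fun (cv : Int × Int) ch =>
                if ch ∉ pvVowels then (cv.1 + 1, cv.2) else (cv.1, cv.2 + 1)) (0, 1) := by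
          simp only [pvCnt, List.foldl_cons]
          rw [if_neg (not_not_intro hy)]
          norm_num
        rw [h0, ih]; simp
      rw [List.foldl_cons]
      rw [if_neg (not_not_intro hy)]
      show List.foldl _ (a, b + 1) t = _
      rw [ih, hc]
      simp [Prod.ext_iff]; try omega
    · have hc : pvCnt (y :: t) = (1 + (pvCnt t).1, (pvCnt t).2) := by
        have h0 : pvCnt (y :: t)
            = t.foldl (fun (cv : Int × Int) ch =>
                if ch ∉ pvVowels then (cv.1 + 1, cv.2) else (cv.1, cv.2 + 1)) (1, 0) := by
          simp only [pvCnt, List.foldl_cons]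
          rw [if_pos hy]
          norm_num
        rw [h0, ih]; simp
      rw [List.foldl_cons]
      rw [if_pos hy]
      show List.foldl _ (a + 1, b) t = _
      rw [ih, hc]
      simp [Prod.ext_iff]; try omega

lemma pvRec_eq (rest : List String) : ∀ (n : Nat) (cons vowel : Int) (acc : List String),
    solutionRec rest (n : Int) cons vowel acc
      = (PySem.List.combinations rest n).flatMap (fun comb =>
          if 2 ≤ cons + (pvCnt comb).1 ∧ 1 ≤ vowel + (pvCnt comb).2
          then [PySem.Str.join "" (acc ++ comb)] else []) := by
  induction rest with
  | nil =>
    intro n cons vowel acc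
    cases n with
    | zero => simp [solutionRec, PySem.List.combinations_zero, pvCnt]
    | succ m =>
      rw [solutionRec, PySem.List.combinations_nil_succ]
      have hk' : ¬(((m + 1 : Nat) : Int) = 0) := by omega
      have hl' : ((([] : List String).length : Int) < ((m + 1 : Nat) : Int)) := by simp
      rw [if_neg hk', if_pos hl']
      simp
  | cons x xs ih =>
    intro n cons vowel acc
    cases n with
    | zero => simp [solutionRec, PySem.List.combinations_zero, pvCnt]
    | succ m =>
      rw [solutionRec]
      have hk' : ¬(((m + 1 : Nat) : Int) = 0) := by omega
      by_cases hlen : (((x :: xs).length : Int) < ((m + 1 : Nat) : Int))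
      · -- too few letters left: both sides are empty
        have h3 : (x :: xs).length < m + 1 := by exact_mod_cast hlen
        rw [if_neg hk', if_pos hlen, PySem.List.combinations_eq_nil_of_length_lt _ h3]
        simp
      · -- take x, then skip x
        rw [if_neg hk', if_neg hlen]
        rw [PySem.List.combinations_cons_succ, List.flatMap_append, List.flatMap_map]
        have hsub : ((m + 1 : Nat) : Int) - 1 = (m : Int) := by push_cast; ring
        rw [ih (m + 1) cons vowel acc]
        congr 1
        · by_cases hx : x ∈ pvVowels
          · rw [if_pos hx, hsub, ih m cons (vowel + 1) (acc ++ [x])]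
            refine List.flatMap_congr ?_
            intro comb _
            have hc : pvCnt (x :: comb) = ((pvCnt comb).1, 1 + (pvCnt comb).2) := by
              have h0 : pvCnt (x :: comb)
                  = comb.foldl (fun (cv : Int × Int) ch =>
                      if ch ∉ pvVowels then (cv.1 + 1, cv.2) else (cv.1, cv.2 + 1)) (0, 1) := by
                simp only [pvCnt, List.foldl_cons]; simp [hx]
              rw [h0, pvCnt_shift]; simp
            have hc1 : (pvCnt (x :: comb)).1 = (pvCnt comb).1 := by rw [hc]
            have hc2 : (pvCnt (x :: comb)).2 = 1 + (pvCnt comb).2 := by rw [hc]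
            have hj : (acc ++ [x]) ++ comb = acc ++ x :: comb := by simp
            rw [hc1, hc2, hj]
            exact if_congr (by omega) rfl rfl
          · rw [if_neg hx, hsub, ih m (cons + 1) vowel (acc ++ [x])]
            refine List.flatMap_congr ?_
            intro comb _
            have hc : pvCnt (x :: comb) = (1 + (pvCnt comb).1, (pvCnt comb).2) := by
              have h0 : pvCnt (x :: comb)
                  = comb.foldl (fun (cv : Int × Int) ch =>
                      if ch ∉ pvVowels then (cv.1 + 1, cv.2) else (cv.1, cv.2 + 1)) (1, 0) := by
                simp only [pvCnt, List.foldl_cons]; simp [hx]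
              rw [h0, pvCnt_shift]; simp
            have hc1 : (pvCnt (x :: comb)).1 = 1 + (pvCnt comb).1 := by rw [hc]
            have hc2 : (pvCnt (x :: comb)).2 = (pvCnt comb).2 := by rw [hc]
            have hj : (acc ++ [x]) ++ comb = acc ++ x :: comb := by simp
            rw [hc1, hc2, hj]
            exact if_congr (by omega) rfl rfl

-- A's accumulate-if-valid loop, as a flatMap
lemma pvFold_eq (L : List (List String)) : ∀ (acc : List String),
    L.foldl (fun res comb =>
      if 2 ≤ (comb.foldl
            (fun (cv : Int × Int) ch =>
              if ch ∉ pvVowels then (cv.1 + 1, cv.2) else (cv.1, cv.2 + 1)) (0, 0)).1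
        ∧ 1 ≤ (comb.foldl
            (fun (cv : Int × Int) ch =>
              if ch ∉ pvVowels then (cv.1 + 1, cv.2) else (cv.1, cv.2 + 1)) (0, 0)).2
      then res ++ [PySem.Str.join "" comb] else res) acc
    = acc ++ L.flatMap (fun comb =>
        if 2 ≤ (pvCnt comb).1 ∧ 1 ≤ (pvCnt comb).2
        then [PySem.Str.join "" comb] else []) := by
  induction L with
  | nil => intro acc; simp
  | cons hd tl ih =>
    intro acc
    rw [List.foldl_cons, List.flatMap_cons, ih]
    show (if 2 ≤ (pvCnt hd).1 ∧ 1 ≤ (pvCnt hd).2 then acc ++ [PySem.Str.join "" hd] else acc) ++ _ = _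
    split_ifs <;> simp

-- ===== VERDICT =====
theorem solution_spec : Claim_equal_solution := by
  intro l c arr _ hpre
  unfold Spec_solution
  obtain ⟨n, rfl⟩ : ∃ n : Nat, l = (n : Int) := ⟨l.toNat, (Int.toNat_of_nonneg hpre).symm⟩
  show solution _ _ _ = _
  unfold solution solution_alt
  rw [pvRec_eq]
  simp only [Int.toNat_natCast]
  rw [pvFold_eq]
  simp only [List.nil_append, zero_add]
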